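-- pv_equiv track=rewrite | github.com/LehengTHU/Agent4Rec | datasets/ml-1m/1_get_cf_data.py | int_to_user_dict
-- ===== SOURCE A (Python) =====
-- def int_to_user_dict(interaction):
--     """
--     convert a list of interactions into a dictionary
--     that maps each user to a list of their interactions
--     input: df with columns ['user_id', 'movie_id']
--     output: dict with key: user_id, value: list of movie_id
--     """
--     user_dict = {}
--     for u, v in interaction:
--         if(u not in user_dict.keys()):
--             user_dict[u] = [v]
--         else:
--             user_dict[u].append(v)
--     # Sort according to key.
--     user_dict = dict(sorted(user_dict.items(), key=lambda x: x[0]))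
--     return user_dict
-- ===== SOURCE B (Python) =====
-- def int_to_user_dict(interaction):
--     users = sorted({u for u, _ in interaction})
--     return {u: [v for x, v in interaction if x == u] for u in users}
-- ===== Notes on version B (the rewrite author's own statement) =====
-- stated objective: simpler
-- what changed: Replaces the incremental hash-map accumulation plus final item-sort with: sort the distinct user ids once, then build the result as a dict comprehension collecting each user's movie ids by a filter pass over the input.
import Mathlib
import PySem

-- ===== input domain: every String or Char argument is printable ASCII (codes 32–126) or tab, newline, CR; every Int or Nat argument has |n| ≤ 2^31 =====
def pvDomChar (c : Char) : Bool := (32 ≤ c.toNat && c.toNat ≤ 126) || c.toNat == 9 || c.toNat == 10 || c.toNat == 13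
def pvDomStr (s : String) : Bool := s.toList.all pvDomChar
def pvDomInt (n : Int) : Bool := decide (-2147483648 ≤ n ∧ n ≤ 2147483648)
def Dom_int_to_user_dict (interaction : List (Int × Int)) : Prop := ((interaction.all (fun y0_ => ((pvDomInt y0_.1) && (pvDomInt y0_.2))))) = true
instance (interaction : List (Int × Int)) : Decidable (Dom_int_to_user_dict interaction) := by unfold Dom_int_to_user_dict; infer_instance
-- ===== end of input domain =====

-- B replaces A's incremental hash-map accumulation + final item-sort by: sort the
-- distinct user ids once, then collect each user's movie ids by a filter pass (simpler).

-- ===== PORT A =====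
-- the dict-building loop: if u not in keys, set [v], else append v (in place)
def int_to_user_dict (interaction : List (Int × Int)) : List (Int × List Int) :=
  let user_dict : PySem.Dict Int (List Int) :=
    interaction.foldl
      (fun d p =>
        if d.contains p.1 = false then d.insert p.1 [p.2]
        else d.insert p.1 (d.getD p.1 [] ++ [p.2]))
      PySem.Dict.empty
  -- dict(sorted(user_dict.items(), key=lambda x: x[0])): keys are distinct, so the
  -- resulting dict is exactly the sorted association list
  PySem.List.sorted user_dict.items (fun x => x.1) false

-- ===== PORT B =====
def int_to_user_dict_alt (interaction : List (Int × Int)) : List (Int × List Int) :=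
  let users := PySem.List.sorted (PySem.Set.ofList (interaction.map (·.1))) (fun x => x) false
  users.map (fun u => (u, (interaction.filter (fun p => p.1 == u)).map (·.2)))

-- ===== PRECONDITION & SPEC =====
def Spec_int_to_user_dict (interaction : List (Int × Int)) (out : List (Int × List Int)) : Prop := out = int_to_user_dict_alt interaction
instance (interaction : List (Int × Int)) (out : List (Int × List Int)) : Decidable (Spec_int_to_user_dict interaction out) := by unfold Spec_int_to_user_dict; infer_instance

-- ===== CLAIM (what is proved, stated in full; the proofs are below) =====
def Claim_equal_int_to_user_dict : Prop := ∀ (interaction : List (Int × Int)), Dom_int_to_user_dict interaction → Spec_int_to_user_dict interaction (int_to_user_dict interaction)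

-- ===== LEMMAS AND PROOFS =====

-- A's loop body is exactly d.modify p.1 [] (· ++ [p.2])
lemma loop_body_eq (d : PySem.Dict Int (List Int)) (p : Int × Int) :
    (if d.contains p.1 = false then d.insert p.1 [p.2]
     else d.insert p.1 (d.getD p.1 [] ++ [p.2]))
      = d.modify p.1 [] (· ++ [p.2]) := by
  by_cases h : d.contains p.1 = false
  · rw [PySem.Dict.modify, PySem.Dict.getD_of_not_contains d [] h]
    simp [h]
  · simp [h, PySem.Dict.modify]

lemma foldA_eq (interaction : List (Int × Int)) :
    interaction.foldl
      (fun d p =>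
        if d.contains p.1 = false then d.insert p.1 [p.2]
        else d.insert p.1 (d.getD p.1 [] ++ [p.2]))
      PySem.Dict.empty
    = interaction.foldl (fun d p => d.modify p.1 [] (· ++ [p.2])) PySem.Dict.empty := by
  congr 1
  funext d p
  exact loop_body_eq d p

-- ===== VERDICT (by name: the statement is the Claim_ definition above) =====
theorem int_to_user_dict_spec : Claim_equal_int_to_user_dict := by
  intro interaction _
  unfold Spec_int_to_user_dict int_to_user_dict int_to_user_dict_alt
  rw [foldA_eq]
  set dA := interaction.foldl (fun d p => d.modify p.1 [] (· ++ [p.2])) PySem.Dict.empty with hdA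
  have hkeys : dA.keys = PySem.Set.ofList (interaction.map (·.1)) := by
    rw [hdA, PySem.Dict.keys_foldl_modify_key]
    simp [PySem.Set.update, PySem.Set.ofList_eq_foldl]
  have hnd : dA.keys.Nodup := by
    rw [hdA]
    exact PySem.Dict.nodup_keys_foldl_modify_key _ _ _ _ _ PySem.Dict.nodup_keys_empty
  have hget : ∀ u : Int, dA.getD u [] = (interaction.filter (fun p => p.1 == u)).map (·.2) := by
    intro u
    rw [hdA, PySem.Dict.getD_foldl_modify_append]
    simp
  have hitems : dA.items = dA.keys.map (fun k => (k, dA.getD k [])) :=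
    PySem.Dict.items_eq_map_keys dA hnd []
  have hfun : (fun k : Int => (k, dA.getD k []))
      = (fun u : Int => (u, (interaction.filter (fun p => p.1 == u)).map (·.2))) := by
    funext u; rw [hget]
  apply PySem.List.sorted_eq_of_perm_of_pairwise_lt
  · -- B's list is a permutation of dA.items
    show (List.map (fun u : Int => (u, (interaction.filter (fun p => p.1 == u)).map (·.2)))
        (PySem.List.sorted (PySem.Set.ofList (interaction.map (·.1))) (fun x => x) false)).Perm
        dA.items
    rw [hitems, hkeys, hfun]
    exact List.Perm.map _ (PySem.List.sorted_perm _ _ _)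
  · -- B's list has strictly increasing first components
    show List.Pairwise (fun a b => a.1 < b.1)
        (List.map (fun u : Int => (u, (interaction.filter (fun p => p.1 == u)).map (·.2)))
          (PySem.List.sorted (PySem.Set.ofList (interaction.map (·.1))) (fun x => x) false))
    rw [List.pairwise_map]
    simpa using PySem.List.sorted_ofList_pairwise_lt (xs := interaction.map (·.1))
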